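-- pv_equiv track=rewrite | github.com/s28961-pj/MHE | functions/utils/is_cell_lit.py | is_lit
-- ===== SOURCE A (Python) =====
-- def is_lit(grid, row, col):
--     """
--         Sprawdza, czy pole (row, col) jest oświetlone przez jakąkolwiek żarówkę
--     """
--
--     if grid[row][col] != ' ':
--         return True  # Nie jest puste, więc nie musi być oświetlone
--
--     # Sprawdzamy 4 kierunki: góra, dół, lewo, prawo
--     directions = [(-1, 0), (1, 0), (0, -1), (0, 1)]
--
--     for dx, dy in directions:
--         nx, ny = row + dx, col + dy
--         while 0 <= nx < len(grid) and 0 <= ny < len(grid[0]):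
--             if grid[nx][ny] in ('#', '0', '1', '2', '3', '4'):
--                 break
--             if grid[nx][ny] == 'B':
--                 return True
--             nx += dx
--             ny += dy
--     return False
-- ===== SOURCE B (Python) =====
-- SIG = ('#', '0', '1', '2', '3', '4', 'B')
--
--
-- def _first_sig(ray):
--     for ch in ray:
--         if ch in SIG:
--             return ch
--     return None
--
--
-- def is_lit(grid, row, col):
--     if grid[row][col] != ' ':
--         return True
--     rowstr = grid[row]
--     colstr = [r[col] for r in grid]
--     rays = [rowstr[:col][::-1], rowstr[col + 1:],
--             colstr[:row][::-1], colstr[row + 1:]]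
--     return any(_first_sig(ray) == 'B' for ray in rays)
-- ===== Notes on version B (the rewrite author's own statement) =====
-- stated objective: idiomatic
-- what changed: A walks cell-by-cell in four directions with a coordinate-stepping while loop; B builds the column as a new list, slices the row/column into four outward rays, and tests whether the first significant cell ('#','0'-'4','B') of any ray is a bulb.
-- outside the precondition, e.g. on is_lit([[' ', 'B']], -1, 0): A returns False, B returns True; on is_lit([['#', ' '], [' ', '0', '0'], []], 0, 1): A returns False, B raises IndexError; on is_lit([[' '], ['x', 'x']], -2, 0): A returns False, B returns False
import Mathlib
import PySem

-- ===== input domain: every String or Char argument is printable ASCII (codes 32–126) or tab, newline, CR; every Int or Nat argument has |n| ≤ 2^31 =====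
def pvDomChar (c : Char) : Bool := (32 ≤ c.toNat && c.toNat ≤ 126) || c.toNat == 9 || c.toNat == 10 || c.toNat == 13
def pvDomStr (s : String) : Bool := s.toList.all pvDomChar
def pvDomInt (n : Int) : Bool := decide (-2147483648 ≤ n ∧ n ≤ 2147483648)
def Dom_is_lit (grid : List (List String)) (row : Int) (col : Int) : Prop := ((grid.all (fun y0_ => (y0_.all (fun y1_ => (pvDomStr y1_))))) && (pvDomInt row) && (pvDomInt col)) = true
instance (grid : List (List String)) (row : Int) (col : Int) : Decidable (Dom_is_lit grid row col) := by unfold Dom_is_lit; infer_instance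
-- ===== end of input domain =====

-- B rebuilds the check as four outward rays (slices of the row and of the freshly built column)
-- and asks whether the first "significant" cell of some ray is a bulb; not faster, just idiomatic.

-- ===== PORT A =====
def pvBlockers : List String := ["#", "0", "1", "2", "3", "4"]

-- the cell grid[nx][ny]; defaults are only reached where Python would raise (excluded by Pre_)
def pvCell (grid : List (List String)) (nx ny : Int) : String :=
  (PySem.List.pyGet? ((PySem.List.pyGet? grid nx).getD []) ny).getD " "

-- the inner `while` loop of A; fuel only bounds the iteration count (A's loop always terminates
-- inside the grid bounds), it never changes the computed value for the fuel supplied below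
def pvScan (grid : List (List String)) (dx dy : Int) : Nat → Int → Int → Bool
  | 0, _, _ => false
  | fuel + 1, nx, ny =>
    if 0 ≤ nx ∧ nx < (grid.length : Int) ∧ 0 ≤ ny ∧ ny < ((grid.headI).length : Int) then
      if pvCell grid nx ny ∈ pvBlockers then false
      else if pvCell grid nx ny = "B" then true
      else pvScan grid dx dy fuel (nx + dx) (ny + dy)
    else false

def is_lit (grid : List (List String)) (row : Int) (col : Int) : Bool :=
  match (PySem.List.pyGet? grid row).bind (fun r => PySem.List.pyGet? r col) with
  | none => false   -- Python raises IndexError here; excluded by Pre_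
  | some c =>
    if c ≠ " " then true
    else
      [((-1 : Int), (0 : Int)), (1, 0), (0, -1), (0, 1)].any
        (fun d => pvScan grid d.1 d.2 (grid.length + (grid.headI).length + 1) (row + d.1) (col + d.2))

-- ===== PORT B =====
def pvSig : List String := ["#", "0", "1", "2", "3", "4", "B"]

def pvFirstSig (ray : List String) : Option String :=
  ray.find? (fun ch => pvSig.contains ch)

def is_lit_alt (grid : List (List String)) (row : Int) (col : Int) : Bool :=
  match (PySem.List.pyGet? grid row).bind (fun r => PySem.List.pyGet? r col) with
  | none => false   -- Python raises IndexError here; excluded by Pre_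
  | some c =>
    if c ≠ " " then true
    else
      let rowstr := (PySem.List.pyGet? grid row).getD []
      let colstr := grid.map (fun r => (PySem.List.pyGet? r col).getD " ")
      let rays := [(PySem.List.slice rowstr none (some col)).reverse,
                   PySem.List.slice rowstr (some (col + 1)) none,
                   (PySem.List.slice colstr none (some row)).reverse,
                   PySem.List.slice colstr (some (row + 1)) none]
      rays.any (fun ray => pvFirstSig ray == some "B")

-- ===== PRECONDITION & SPEC =====
-- Pre_ excludes (a) inputs where A raises IndexError (cell (row,col) unreachable, or a ragged
-- grid hit during a scan), and (b) blank-cell inputs outside the natural domain — negative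
-- indices (Python wraparound) or a ragged grid, on which A's scans depend on accidental geometry.
def Pre_is_lit (grid : List (List String)) (row : Int) (col : Int) : Prop :=
  ((PySem.List.pyGet? grid row).bind (fun r => PySem.List.pyGet? r col)).isSome = true ∧
  (((PySem.List.pyGet? grid row).bind (fun r => PySem.List.pyGet? r col)).getD " " = " " →
    0 ≤ row ∧ row < (grid.length : Int) ∧ 0 ≤ col ∧ col < ((grid.headI).length : Int) ∧
    ∀ r ∈ grid, r.length = (grid.headI).length)
instance (grid : List (List String)) (row : Int) (col : Int) : Decidable (Pre_is_lit grid row col) := by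
  unfold Pre_is_lit; infer_instance

def pvWitness_is_lit : List (List String) × Int × Int := ([[" ", "B"], [" ", " "]], 0, 0)

def Spec_is_lit (grid : List (List String)) (row : Int) (col : Int) (out : Bool) : Prop := out = is_lit_alt grid row col
instance (grid : List (List String)) (row : Int) (col : Int) (out : Bool) : Decidable (Spec_is_lit grid row col out) := by unfold Spec_is_lit; infer_instance

-- ===== CLAIM (what is proved, stated in full; the proofs are below) =====
def Claim_equal_is_lit : Prop := ∀ (grid : List (List String)) (row : Int) (col : Int), Dom_is_lit grid row col → Pre_is_lit grid row col → Spec_is_lit grid row col (is_lit grid row col)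

-- ===== LEMMAS AND PROOFS =====

-- B's per-ray test "first significant cell is a bulb", phrased as A's step-by-step walk
def pvLoopB (ray : List String) : Bool :=
  match ray with
  | [] => false
  | c :: t => if c ∈ pvBlockers then false else if c = "B" then true else pvLoopB t

lemma firstSig_eq_loopB (ray : List String) :
    (pvFirstSig ray == some "B") = pvLoopB ray := by
  induction ray with
  | nil => rfl
  | cons c t ih =>
    by_cases hb : c ∈ pvBlockers
    · have hc : c ∈ pvSig := by
        simp only [pvBlockers, List.mem_cons, List.not_mem_nil, or_false] at hb
        rcases hb with h|h|h|h|h|h <;> subst h <;> decide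
      have hne : c ≠ "B" := by
        simp only [pvBlockers, List.mem_cons, List.not_mem_nil, or_false] at hb
        rcases hb with h|h|h|h|h|h <;> subst h <;> decide
      simp [pvFirstSig, pvLoopB, List.find?, hc, hb, hne]
    · by_cases hB : c = "B"
      · subst hB
        simp [pvFirstSig, pvLoopB, List.find?, pvSig, pvBlockers]
      · have hc : c ∉ pvSig := by
          simp only [pvSig, List.mem_cons, List.not_mem_nil, or_false]
          simp only [pvBlockers, List.mem_cons, List.not_mem_nil, or_false] at hb
          tauto
        simpa [pvFirstSig, pvLoopB, List.find?, hc, hb, hB] using ih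

lemma cell_eq (grid : List (List String)) (i j : Nat)
    (hi : i < grid.length) (hj : j < (grid.getD i []).length) :
    pvCell grid (i : Int) (j : Int) = (grid.getD i []).getD j " " := by
  simp [pvCell, List.getD_eq_getElem?_getD, hi,
    (by simpa [List.getD_eq_getElem?_getD, List.getElem?_eq_getElem, hi] using hj :
      j < (grid[i]'hi).length)]

lemma scan_right (grid : List (List String)) (R : Nat)
    (hR : R < grid.length) (hlen : (grid.getD R []).length = (grid.headI).length) :
    ∀ fuel j, j ≤ (grid.headI).length → (grid.headI).length ≤ fuel + j →
      pvScan grid 0 1 fuel (R : Int) (j : Int) = pvLoopB ((grid.getD R []).drop j) := by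
  intro fuel
  induction fuel with
  | zero =>
    intro j hj hW
    have : j = (grid.headI).length := le_antisymm hj (by omega)
    simp [pvScan, this, ← hlen, pvLoopB]
  | succ fuel ih =>
    intro j hj hW
    by_cases hjW : j < (grid.headI).length
    · have hcond : (0:Int) ≤ (R:Int) ∧ (R:Int) < (grid.length : Int) ∧
          (0:Int) ≤ (j:Int) ∧ (j:Int) < ((grid.headI).length : Int) := by
        refine ⟨by positivity, by exact_mod_cast hR, by positivity, by exact_mod_cast hjW⟩
      have hjr : j < (grid.getD R []).length := by omega
      have hcell := cell_eq grid R j hR hjr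
      have hdrop : (grid.getD R []).drop j =
          (grid.getD R []).getD j " " :: (grid.getD R []).drop (j+1) := by
        rw [List.drop_eq_getElem_cons hjr, List.getD_eq_getElem _ _ hjr]
      rw [hdrop]
      have hrec : (j : Int) + 1 = ((j+1 : Nat) : Int) := by push_cast; ring
      simp only [pvScan, hcond, and_self, if_true, hcell, pvLoopB, add_zero, hrec]
      split_ifs with h1 h2 <;> simp_all
      exact ih (j+1) (by omega) (by omega)
    · have hjeq : j = (grid.headI).length := by omega
      subst hjeq
      simp only [pvScan]
      rw [if_neg (by omega)]
      rw [List.drop_eq_nil_of_le (le_of_eq hlen)]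
      rfl

lemma scan_left (grid : List (List String)) (R : Nat)
    (hR : R < grid.length) (hlen : (grid.getD R []).length = (grid.headI).length) :
    ∀ fuel j, j ≤ (grid.headI).length → j ≤ fuel →
      pvScan grid 0 (-1) fuel (R : Int) ((j : Int) - 1) = pvLoopB (((grid.getD R []).take j).reverse) := by
  intro fuel
  induction fuel with
  | zero =>
    intro j hj hf
    have : j = 0 := by omega
    simp [pvScan, this, pvLoopB]
  | succ fuel ih =>
    intro j hj hf
    match j with
    | 0 =>
      simp [pvScan, pvLoopB]
    | k + 1 =>
      have hny : ((k+1 : Nat) : Int) - 1 = (k : Int) := by push_cast; ring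
      have hkW : k < (grid.headI).length := by omega
      have hcond : (0:Int) ≤ (R:Int) ∧ (R:Int) < (grid.length : Int) ∧
          (0:Int) ≤ (k:Int) ∧ (k:Int) < ((grid.headI).length : Int) := by
        refine ⟨by positivity, by exact_mod_cast hR, by positivity, by exact_mod_cast hkW⟩
      have hkr : k < (grid.getD R []).length := by omega
      have hcell := cell_eq grid R k hR hkr
      have htake : ((grid.getD R []).take (k+1)).reverse =
          (grid.getD R []).getD k " " :: ((grid.getD R []).take k).reverse := by
        rw [List.take_add_one, List.getElem?_eq_getElem hkr, List.getD_eq_getElem _ _ hkr]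
        simp
      rw [hny, htake]
      simp only [pvScan, hcond, and_self, if_true, hcell, pvLoopB, add_zero]
      split_ifs with h1 h2 <;> simp_all
      have : (k : Int) + -1 = (k : Int) - 1 := by ring
      rw [this]
      exact ih k (by omega) (by omega)

lemma scan_down (grid : List (List String)) (C : Nat)
    (hC : C < (grid.headI).length)
    (hrect : ∀ r ∈ grid, r.length = (grid.headI).length) :
    ∀ fuel i, i ≤ grid.length → grid.length ≤ fuel + i →
      pvScan grid 1 0 fuel (i : Int) (C : Int) =
        pvLoopB ((grid.map (fun r => r.getD C " ")).drop i) := by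
  intro fuel
  induction fuel with
  | zero =>
    intro i hi hn
    have hieq : i = grid.length := by omega
    subst hieq
    rw [List.drop_eq_nil_of_le (by simp)]
    rfl
  | succ fuel ih =>
    intro i hi hn
    by_cases hin : i < grid.length
    · have hcond : (0:Int) ≤ (i:Int) ∧ (i:Int) < (grid.length : Int) ∧
          (0:Int) ≤ (C:Int) ∧ (C:Int) < ((grid.headI).length : Int) := by
        refine ⟨by positivity, by exact_mod_cast hin, by positivity, by exact_mod_cast hC⟩
      have hCr : C < (grid.getD i []).length := by
        rw [List.getD_eq_getElem _ _ hin, hrect _ (List.getElem_mem hin)]; exact hC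
      have hcell := cell_eq grid i C hin hCr
      have him : i < (grid.map (fun r => r.getD C " ")).length := by simpa using hin
      have hdrop : (grid.map (fun r => r.getD C " ")).drop i =
          (grid.getD i []).getD C " " :: (grid.map (fun r => r.getD C " ")).drop (i+1) := by
        rw [List.drop_eq_getElem_cons him]
        simp [List.getD_eq_getElem?_getD, hin]
      rw [hdrop]
      have hrec : (i : Int) + 1 = ((i+1 : Nat) : Int) := by push_cast; ring
      simp only [pvScan, hcond, and_self, if_true, hcell, pvLoopB, add_zero, hrec]
      split_ifs with h1 h2 <;> simp_all
      exact ih (i+1) (by omega) (by omega)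
    · have hieq : i = grid.length := by omega
      subst hieq
      simp only [pvScan]
      rw [if_neg (by omega)]
      rw [List.drop_eq_nil_of_le (by simp)]
      rfl

lemma scan_up (grid : List (List String)) (C : Nat)
    (hC : C < (grid.headI).length)
    (hrect : ∀ r ∈ grid, r.length = (grid.headI).length) :
    ∀ fuel i, i ≤ grid.length → i ≤ fuel →
      pvScan grid (-1) 0 fuel ((i : Int) - 1) (C : Int) =
        pvLoopB (((grid.map (fun r => r.getD C " ")).take i).reverse) := by
  intro fuel
  induction fuel with
  | zero =>
    intro i hi hf
    have : i = 0 := by omega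
    simp [pvScan, this, pvLoopB]
  | succ fuel ih =>
    intro i hi hf
    match i with
    | 0 =>
      simp [pvScan, pvLoopB]
    | k + 1 =>
      have hny : ((k+1 : Nat) : Int) - 1 = (k : Int) := by push_cast; ring
      have hkn : k < grid.length := by omega
      have hcond : (0:Int) ≤ (k:Int) ∧ (k:Int) < (grid.length : Int) ∧
          (0:Int) ≤ (C:Int) ∧ (C:Int) < ((grid.headI).length : Int) := by
        refine ⟨by positivity, by exact_mod_cast hkn, by positivity, by exact_mod_cast hC⟩
      have hCr : C < (grid.getD k []).length := by
        rw [List.getD_eq_getElem _ _ hkn, hrect _ (List.getElem_mem hkn)]; exact hC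
      have hcell := cell_eq grid k C hkn hCr
      have hkm : k < (grid.map (fun r => r.getD C " ")).length := by simpa using hkn
      have htake : (((grid.map (fun r => r.getD C " "))).take (k+1)).reverse =
          (grid.getD k []).getD C " " :: (((grid.map (fun r => r.getD C " "))).take k).reverse := by
        rw [List.take_add_one, List.getElem?_eq_getElem hkm]
        simp [List.getD_eq_getElem?_getD, hkn]
      rw [hny, htake]
      simp only [pvScan, hcond, and_self, if_true, hcell, pvLoopB, add_zero]
      split_ifs with h1 h2 <;> simp_all
      have : (k : Int) + -1 = (k : Int) - 1 := by ring
      rw [this]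
      exact ih k (by omega) (by omega)

theorem is_lit_spec : Claim_equal_is_lit := by
  intro grid row col _ hpre
  unfold Spec_is_lit is_lit is_lit_alt
  obtain ⟨hsome, hblank⟩ := hpre
  obtain ⟨c, hc⟩ := Option.isSome_iff_exists.mp hsome
  rw [hc]
  by_cases hcs : c = " "
  case neg => simp [hcs]
  case pos =>
    subst hcs
    obtain ⟨hr0, hrn, hc0, hcW, hrect⟩ := hblank (by rw [hc]; rfl)
    simp only [ne_eq, not_true_eq_false, if_false]
    set n := grid.length with hn
    set W := (grid.headI).length with hWdef
    obtain ⟨R, hrowR⟩ : ∃ R : Nat, row = (R : Int) := ⟨row.toNat, (Int.toNat_of_nonneg hr0).symm⟩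
    obtain ⟨C, hcolC⟩ : ∃ C : Nat, col = (C : Int) := ⟨col.toNat, (Int.toNat_of_nonneg hc0).symm⟩
    subst hrowR hcolC
    have hRn : R < n := by exact_mod_cast hrn
    have hCW : C < W := by exact_mod_cast hcW
    have hrowstr : (PySem.List.pyGet? grid (R : Int)).getD [] = grid.getD R [] := by
      simp [List.getD_eq_getElem?_getD]
    have hlenR : (grid.getD R []).length = W := by
      rw [List.getD_eq_getElem _ _ hRn]; exact hrect _ (List.getElem_mem hRn)
    have hcolstr : grid.map (fun r => (PySem.List.pyGet? r (C : Int)).getD " ") =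
        grid.map (fun r => r.getD C " ") := by
      refine List.map_congr_left (fun r hr => ?_)
      simp [List.getD_eq_getElem?_getD]
    -- rewrite the slices
    have hCadd : (C : Int) + 1 = ((C + 1 : Nat) : Int) := by push_cast; ring
    have hRadd : (R : Int) + 1 = ((R + 1 : Nat) : Int) := by push_cast; ring
    rw [hrowstr, hcolstr, hCadd, hRadd,
      PySem.List.slice_to_natCast, PySem.List.slice_from_natCast,
      PySem.List.slice_to_natCast, PySem.List.slice_from_natCast]
    -- rewrite the four scans
    have hup := scan_up grid C hCW hrect (n + W + 1) R (le_of_lt hRn) (by omega)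
    have hdown := scan_down grid C hCW hrect (n + W + 1) (R + 1) (by omega) (by omega)
    have hleft := scan_left grid R hRn hlenR (n + W + 1) C (le_of_lt hCW) (by omega)
    have hright := scan_right grid R hRn hlenR (n + W + 1) (C + 1) (by omega) (by omega)
    have e1 : (R : Int) + -1 = (R : Int) - 1 := by ring
    have e2 : (C : Int) + -1 = (C : Int) - 1 := by ring
    simp only [List.any_cons, List.any_nil, add_zero, e1, e2, hCadd, hRadd,
      hup, hdown, hleft, hright, firstSig_eq_loopB, Bool.or_false]
    cases pvLoopB (((grid.getD R []).take C).reverse) <;>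
      cases pvLoopB ((grid.getD R []).drop (C + 1)) <;>
      cases pvLoopB (((grid.map (fun r => r.getD C " ")).take R).reverse) <;>
      cases pvLoopB ((grid.map (fun r => r.getD C " ")).drop (R + 1)) <;>
      simp
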